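-- pv_equiv track=rewrite | github.com/ChrisAdkin8/gcp-hashi-knowledge-base | cloudbuild/scripts/ingest_graph.py | _leaf_addr
-- ===== SOURCE A (Python) =====
-- def _leaf_addr(addr: str) -> str:
--     """Strip leading module.X. prefixes to get the leaf resource address."""
--     leaf = addr
--     while leaf.startswith("module."):
--         parts = leaf.split(".", 2)
--         if len(parts) < 3:
--             break
--         leaf = parts[2]
--     return leaf
-- ===== SOURCE B (Python) =====
-- def _leaf_addr(addr: str) -> str:
--     """Strip leading module.X. prefixes to get the leaf resource address."""
--     tokens = addr.split(".")
--     while len(tokens) >= 3 and tokens[0] == "module":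
--         tokens = tokens[2:]
--     return ".".join(tokens)
-- ===== Notes on version B (the rewrite author's own statement) =====
-- stated objective: simpler
-- what changed: B splits the address into dot-separated tokens once and strips 'module' prefixes by dropping two tokens at a time from the list, instead of repeatedly re-splitting the remaining string with maxsplit=2 and a startswith test; the result is rejoined with '.'.
import Mathlib
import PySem

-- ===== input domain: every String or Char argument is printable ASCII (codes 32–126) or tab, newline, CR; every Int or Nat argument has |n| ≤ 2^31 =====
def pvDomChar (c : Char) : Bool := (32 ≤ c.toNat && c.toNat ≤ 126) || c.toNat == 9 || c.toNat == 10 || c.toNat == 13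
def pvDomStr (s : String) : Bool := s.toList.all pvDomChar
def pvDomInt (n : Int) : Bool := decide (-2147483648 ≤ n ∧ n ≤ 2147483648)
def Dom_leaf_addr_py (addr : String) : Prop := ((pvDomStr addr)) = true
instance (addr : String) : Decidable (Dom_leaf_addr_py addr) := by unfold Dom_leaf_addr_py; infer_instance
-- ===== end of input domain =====

-- B replaces A's repeated re-splitting (startswith + split(".", 2) each round) by one full split into
-- dot-separated tokens and a loop that drops two tokens while the head token is "module"; simpler, same values.

-- ===== PORT A =====
-- helpers needed by port A's termination proof (cited by name in decreasing_by):
-- prepend a chunk onto the head piece of a split result (how the split loop extends its current piece)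
def pvChL (p : List Char) : List (List Char) → List (List Char)
  | [] => [p]
  | t :: ts => (p ++ t) :: ts

-- structural model of s.split(".", m) (PySem.Chars.splitOnMax with sep "."); used only in proofs
def pvDmax : Nat → List Char → List (List Char)
  | _, [] => [[]]
  | 0, l => [l]
  | m+1, c :: rest => if c = '.' then [] :: pvDmax m rest else pvChL [c] (pvDmax (m+1) rest)

theorem pvDmax_ne_nil (m : Nat) (l : List Char) : pvDmax m l ≠ [] := by
  match m, l with
  | _, [] => simp [pvDmax]
  | 0, _ :: _ => simp [pvDmax]
  | m+1, c :: rest =>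
    by_cases h : c = '.' <;> simp [pvDmax, h]
    cases pvDmax (m+1) rest <;> simp [pvChL]

theorem pvChL_nil {ts : List (List Char)} (h : ts ≠ []) : pvChL [] ts = ts := by
  cases ts with
  | nil => exact absurd rfl h
  | cons t ts => simp [pvChL]

theorem pvChL_pvChL (p q : List Char) (ts : List (List Char)) :
    pvChL p (pvChL q ts) = pvChL (p ++ q) ts := by
  cases ts <;> simp [pvChL]

theorem pvDmax_zero (l : List Char) : pvDmax 0 l = [l] := by
  cases l <;> simp [pvDmax]

theorem pvDotPrefix (c : Char) (rest : List Char) (hc : c = '.') :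
    (['.'] : List Char).isPrefixOf (c :: rest) = true := by
  subst hc; simp [List.isPrefixOf]

theorem pvDotPrefix_neg (c : Char) (rest : List Char) (hc : ¬ c = '.') :
    ¬ (['.'] : List Char).isPrefixOf (c :: rest) = true := by
  simp [List.isPrefixOf]
  exact fun w => hc w.symm

theorem pvGoMax_spec (fuel : Nat) : ∀ (m : Nat) (l cur : List Char) (acc : List (List Char)),
    l.length ≤ fuel →
    PySem.Chars.splitOnMax.go ['.'] fuel m l cur acc =
      acc.reverse ++ pvChL cur.reverse (pvDmax m l) := by
  induction fuel with
  | zero =>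
    intro m l cur acc h
    have : l = [] := List.eq_nil_of_length_eq_zero (Nat.le_zero.mp h)
    subst this
    simp [PySem.Chars.splitOnMax.go, pvDmax, pvChL]
  | succ fuel ih =>
    intro m l cur acc h
    cases l with
    | nil => simp [PySem.Chars.splitOnMax.go, pvDmax, pvChL]
    | cons c rest =>
      simp only [PySem.Chars.splitOnMax.go]
      by_cases hm : m = 0
      · subst hm
        simp [pvDmax_zero, pvChL]
      · obtain ⟨k, rfl⟩ := Nat.exists_eq_succ_of_ne_zero hm
        simp only [Nat.succ_ne_zero, if_false]
        by_cases hc : c = '.'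
        · rw [if_pos (pvDotPrefix c rest hc)]
          subst hc
          rw [show List.drop (['.'] : List Char).length ('.' :: rest) = rest from rfl,
            ih (k+1-1) rest [] _ (Nat.le_of_succ_le_succ h)]
          have hne := pvDmax_ne_nil k rest
          simp [pvDmax, pvChL]
          cases hd : pvDmax k rest with
          | nil => exact absurd hd hne
          | cons t ts => rfl
        · rw [if_neg (pvDotPrefix_neg c rest hc)]
          rw [ih (k+1) rest (c :: cur) acc (Nat.le_of_succ_le_succ h)]
          simp [pvDmax, hc, pvChL_pvChL]

theorem pvSplitOnMax_eq (l : List Char) : PySem.Chars.splitOnMax l ['.'] 2 = pvDmax 2 l := by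
  rw [PySem.Chars.splitOnMax]
  simp only [show ¬((2:Int) < 0) by decide, if_false]
  rw [show ((2:Int)).toNat = 2 from rfl, pvGoMax_spec _ 2 l [] [] (Nat.le_succ _)]
  simp [pvChL_nil (pvDmax_ne_nil 2 l)]

theorem pvDmax_module (rest : List Char) :
    pvDmax 2 ("module.".toList ++ rest) = "module".toList :: pvDmax 1 rest := by
  show pvDmax 2 ('m'::'o'::'d'::'u'::'l'::'e'::'.'::rest) = _
  simp [pvDmax, pvChL]

theorem pvDmax_one_cases (rest : List Char) :
    (pvDmax 1 rest = [rest] ∧ '.' ∉ rest) ∨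
      ∃ t1 t2, pvDmax 1 rest = [t1, t2] ∧ rest = t1 ++ '.' :: t2 ∧ '.' ∉ t1 := by
  induction rest with
  | nil => left; simp [pvDmax]
  | cons c rest ih =>
    by_cases hc : c = '.'
    · subst hc
      right
      exact ⟨[], rest, by simp [pvDmax, pvDmax_zero], rfl, by simp⟩
    · rcases ih with ⟨h1, h2⟩ | ⟨t1, t2, h1, h2, h3⟩
      · left
        refine ⟨by simp [pvDmax, hc, h1, pvChL], ?_⟩
        intro hmem
        rcases List.mem_cons.mp hmem with w | w
        · exact hc w.symm
        · exact h2 w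
      · right
        refine ⟨c :: t1, t2, ?_, by simp [h2], ?_⟩
        · simp [pvDmax, hc, h1, pvChL]
        · intro hmem
          rcases List.mem_cons.mp hmem with w | w
          · exact hc w.symm
          · exact h3 w

-- termination lemma for port A's loop: the third piece of split(".", 2) is strictly shorter
theorem pvLeafDec (leaf : List Char) (h : PySem.Chars.startswith leaf "module.".toList = true)
    (h3 : ¬ (PySem.Chars.splitOnMax leaf ['.'] 2).length < 3) :
    ((PySem.Chars.splitOnMax leaf ['.'] 2).getD 2 []).length < leaf.length := by
  obtain ⟨rest, rfl⟩ := (PySem.Chars.startswith_iff _ _).mp h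
  rw [pvSplitOnMax_eq, pvDmax_module] at *
  rcases pvDmax_one_cases rest with ⟨h1, _⟩ | ⟨t1, t2, h1, rfl, _⟩
  · rw [h1] at h3; simp at h3
  · rw [h1]
    simp
    omega

-- literal port of A's while loop: leaf := leaf.split(".", 2)[2] while leaf startswith "module."
-- and the split has 3 parts (break otherwise)
def pvALoop (leaf : List Char) : List Char :=
  if h : PySem.Chars.startswith leaf "module.".toList then
    if h3 : (PySem.Chars.splitOnMax leaf ['.'] 2).length < 3 then leaf
    else pvALoop ((PySem.Chars.splitOnMax leaf ['.'] 2).getD 2 [])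
  else leaf
termination_by leaf.length
decreasing_by exact pvLeafDec leaf h h3

def leaf_addr_py (addr : String) : String := String.ofList (pvALoop addr.toList)

-- ===== PORT B =====
-- while len(tokens) >= 3 and tokens[0] == "module": tokens = tokens[2:]
def pvDropMods : List (List Char) → List (List Char)
  | t0 :: t1 :: t2 :: ts =>
    if t0 = "module".toList then pvDropMods (t2 :: ts) else t0 :: t1 :: t2 :: ts
  | ts => ts

def leaf_addr_py_alt (addr : String) : String :=
  String.ofList (PySem.Chars.join ['.'] (pvDropMods (PySem.Chars.splitOn addr.toList ['.'])))

-- ===== PRECONDITION & SPEC =====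
def Spec_leaf_addr_py (addr : String) (out : String) : Prop := out = leaf_addr_py_alt addr
instance (addr : String) (out : String) : Decidable (Spec_leaf_addr_py addr out) := by unfold Spec_leaf_addr_py; infer_instance

-- ===== CLAIM (what is proved, stated in full; the proofs are below) =====
def Claim_equal_leaf_addr_py : Prop := ∀ (addr : String), Dom_leaf_addr_py addr → Spec_leaf_addr_py addr (leaf_addr_py addr)

-- ===== LEMMAS AND PROOFS =====

-- structural model of s.split(".") (PySem.Chars.splitOn, full split)
def pvDsplit : List Char → List (List Char)
  | [] => [[]]
  | c :: rest => if c = '.' then [] :: pvDsplit rest else pvChL [c] (pvDsplit rest)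

theorem pvDsplit_ne_nil (l : List Char) : pvDsplit l ≠ [] := by
  match l with
  | [] => simp [pvDsplit]
  | c :: rest =>
    by_cases h : c = '.' <;> simp [pvDsplit, h]
    cases pvDsplit rest <;> simp [pvChL]

theorem pvGo_spec (fuel : Nat) : ∀ (l cur : List Char) (acc : List (List Char)),
    l.length ≤ fuel →
    PySem.Chars.splitOn.go ['.'] fuel l cur acc =
      acc.reverse ++ pvChL cur.reverse (pvDsplit l) := by
  induction fuel with
  | zero =>
    intro l cur acc h
    have : l = [] := List.eq_nil_of_length_eq_zero (Nat.le_zero.mp h)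
    subst this
    simp [PySem.Chars.splitOn.go, pvDsplit, pvChL]
  | succ fuel ih =>
    intro l cur acc h
    cases l with
    | nil => simp [PySem.Chars.splitOn.go, pvDsplit, pvChL]
    | cons c rest =>
      simp only [PySem.Chars.splitOn.go]
      by_cases hc : c = '.'
      · rw [if_pos (pvDotPrefix c rest hc)]
        subst hc
        rw [show List.drop (['.'] : List Char).length ('.' :: rest) = rest from rfl,
          ih rest [] _ (Nat.le_of_succ_le_succ h)]
        have hne := pvDsplit_ne_nil rest
        simp [pvDsplit, pvChL]
        cases hd : pvDsplit rest with
        | nil => exact absurd hd hne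
        | cons t ts => rfl
      · rw [if_neg (pvDotPrefix_neg c rest hc)]
        rw [ih rest (c :: cur) acc (Nat.le_of_succ_le_succ h)]
        simp [pvDsplit, hc, pvChL_pvChL]

theorem pvSplitOn_eq (l : List Char) : PySem.Chars.splitOn l ['.'] = pvDsplit l := by
  rw [PySem.Chars.splitOn, pvGo_spec _ l [] [] (Nat.le_succ _)]
  simp [pvChL_nil (pvDsplit_ne_nil l)]

theorem pvDsplit_module (rest : List Char) :
    pvDsplit ("module.".toList ++ rest) = "module".toList :: pvDsplit rest := by
  show pvDsplit ('m'::'o'::'d'::'u'::'l'::'e'::'.'::rest) = _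
  simp [pvDsplit, pvChL]

theorem pvDsplit_nodot (l : List Char) (h : '.' ∉ l) : pvDsplit l = [l] := by
  induction l with
  | nil => simp [pvDsplit]
  | cons c rest ih =>
    have hc : ¬ c = '.' := fun w => h (w ▸ List.mem_cons_self ..)
    rw [pvDsplit]
    simp only [hc, if_false]
    rw [ih (fun w => h (List.mem_cons_of_mem _ w))]
    simp [pvChL]

theorem pvDsplit_append_dot (t1 t2 : List Char) (h : '.' ∉ t1) :
    pvDsplit (t1 ++ '.' :: t2) = t1 :: pvDsplit t2 := by
  induction t1 with
  | nil => simp [pvDsplit]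
  | cons c t1 ih =>
    have hc : ¬ c = '.' := fun w => h (w ▸ List.mem_cons_self ..)
    rw [List.cons_append, pvDsplit]
    simp only [hc, if_false]
    rw [ih (fun w => h (List.mem_cons_of_mem _ w))]
    simp [pvChL]

theorem pvJoin_pvDsplit (l : List Char) : PySem.Chars.join ['.'] (pvDsplit l) = l := by
  induction l with
  | nil => simp [pvDsplit, PySem.Chars.join_singleton]
  | cons c rest ih =>
    obtain ⟨t, ts, hts⟩ := List.exists_cons_of_ne_nil (pvDsplit_ne_nil rest)
    by_cases hc : c = '.'
    · subst hc
      rw [pvDsplit]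
      simp only [if_true]
      rw [hts] at ih ⊢
      rw [PySem.Chars.join_cons_cons]
      simp [ih]
    · rw [pvDsplit]
      simp only [hc, if_false]
      rw [hts] at ih ⊢
      cases ts with
      | nil =>
        rw [show pvChL [c] [t] = [c :: t] from rfl, PySem.Chars.join_singleton]
        rw [PySem.Chars.join_singleton] at ih
        rw [ih]
      | cons t' ts' =>
        rw [show pvChL [c] (t :: t' :: ts') = (c :: t) :: t' :: ts' from rfl,
          PySem.Chars.join_cons_cons]
        rw [PySem.Chars.join_cons_cons] at ih
        calc (c :: t) ++ ['.'] ++ PySem.Chars.join ['.'] (t' :: ts')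
            = c :: (t ++ ['.'] ++ PySem.Chars.join ['.'] (t' :: ts')) := by simp
          _ = c :: rest := by rw [ih]

theorem pvTokens_prefix (l : List Char) (t1 : List Char) (ts : List (List Char))
    (h : pvDsplit l = "module".toList :: t1 :: ts) :
    PySem.Chars.startswith l "module.".toList = true := by
  rw [PySem.Chars.startswith_iff]
  have hj := pvJoin_pvDsplit l
  rw [h, PySem.Chars.join_cons_cons] at hj
  refine ⟨PySem.Chars.join ['.'] (t1 :: ts), ?_⟩
  rw [show ("module.".toList : List Char) = "module".toList ++ ['.'] by decide, List.append_assoc]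
  rw [← hj]
  simp

theorem pvMainAux (n : Nat) : ∀ l : List Char, l.length ≤ n →
    pvALoop l = PySem.Chars.join ['.'] (pvDropMods (pvDsplit l)) := by
  induction n with
  | zero =>
    intro l hl
    have : l = [] := List.eq_nil_of_length_eq_zero (Nat.le_zero.mp hl)
    subst this
    rw [pvALoop]
    simp [pvDsplit, pvDropMods, PySem.Chars.join_singleton, PySem.Chars.startswith]
  | succ n ih =>
    intro l hl
    by_cases h : PySem.Chars.startswith l "module.".toList = true
    · obtain ⟨rest, rfl⟩ := (PySem.Chars.startswith_iff _ _).mp h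
      rw [pvALoop, dif_pos h]
      rcases pvDmax_one_cases rest with ⟨h1, h2⟩ | ⟨t1, t2, h1, hrest, h4⟩
      · rw [dif_pos (by rw [pvSplitOnMax_eq, pvDmax_module, h1]; simp)]
        rw [pvDsplit_module, pvDsplit_nodot rest h2]
        rw [show pvDropMods ["module".toList, rest] = ["module".toList, rest] from rfl,
          PySem.Chars.join_cons_cons, PySem.Chars.join_singleton]
        simp
      · subst hrest
        rw [dif_neg (by rw [pvSplitOnMax_eq, pvDmax_module, h1]; simp)]
        rw [pvSplitOnMax_eq, pvDmax_module, h1]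
        rw [show (["module".toList, t1, t2].getD 2 []) = t2 from rfl]
        have ht2 : t2.length ≤ n := by
          have := hl
          simp [List.length_append] at this
          omega
        rw [ih t2 ht2]
        rw [pvDsplit_module, pvDsplit_append_dot t1 t2 h4]
        obtain ⟨u, us, hus⟩ := List.exists_cons_of_ne_nil (pvDsplit_ne_nil t2)
        rw [hus]
        rw [show pvDropMods ("module".toList :: t1 :: u :: us) = pvDropMods (u :: us) by
          rw [pvDropMods, if_pos rfl]]
    · rw [pvALoop, dif_neg h]
      have hfix : pvDropMods (pvDsplit l) = pvDsplit l := by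
        match hd : pvDsplit l with
        | [] => rfl
        | [t0] => rfl
        | [t0, t1] => rfl
        | t0 :: t1 :: t2 :: ts =>
          have hne : ¬ t0 = "module".toList := by
            intro he
            subst he
            exact h (pvTokens_prefix l t1 (t2 :: ts) hd)
          rw [pvDropMods, if_neg hne]
      rw [hfix, pvJoin_pvDsplit]

-- ===== VERDICT (by name: the statement is the Claim_ definition above) =====
theorem leaf_addr_py_spec : Claim_equal_leaf_addr_py := by
  intro addr _
  unfold Spec_leaf_addr_py leaf_addr_py leaf_addr_py_alt
  rw [pvSplitOn_eq, pvMainAux addr.toList.length addr.toList (Nat.le_refl _)]
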